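-- pv_equiv track=rewrite | github.com/Ashyy0205/SoundScout | src/soundscout/lastfm.py | _best_image_url
-- ===== SOURCE A (Python) =====
-- def _best_image_url(images: list[dict] | None) -> str:
--     if not images or not isinstance(images, list):
--         return ""
--     for size in ["extralarge", "large", "medium"]:
--         for img in images:
--             if img.get("size") == size and img.get("#text"):
--                 return img.get("#text")
--     # Fallback: last non-empty
--     for img in reversed(images):
--         if img.get("#text"):
--             return img.get("#text")
--     return ""
-- ===== SOURCE B (Python) =====
-- def _best_image_url(images: list[dict] | None) -> str:
--     if not images or not isinstance(images, list):
--         return ""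
--     first = {}   # first non-empty '#text' seen for each size
--     last = ""    # last non-empty '#text' seen
--     for img in images:
--         text = img.get("#text")
--         if text:
--             size = img.get("size")
--             if size not in first:
--                 first[size] = text
--             last = text
--     for size in ["extralarge", "large", "medium"]:
--         if size in first:
--             return first[size]
--     return last
-- ===== Notes on version B (the rewrite author's own statement) =====
-- stated objective: alternative
-- what changed: Replaces A's three priority-ordered scans over the list plus a reversed fallback scan with a single forward pass that builds a dict of the first non-empty '#text' per size and remembers the last non-empty text, then resolves the priority by three dict lookups.
import Mathlib
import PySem

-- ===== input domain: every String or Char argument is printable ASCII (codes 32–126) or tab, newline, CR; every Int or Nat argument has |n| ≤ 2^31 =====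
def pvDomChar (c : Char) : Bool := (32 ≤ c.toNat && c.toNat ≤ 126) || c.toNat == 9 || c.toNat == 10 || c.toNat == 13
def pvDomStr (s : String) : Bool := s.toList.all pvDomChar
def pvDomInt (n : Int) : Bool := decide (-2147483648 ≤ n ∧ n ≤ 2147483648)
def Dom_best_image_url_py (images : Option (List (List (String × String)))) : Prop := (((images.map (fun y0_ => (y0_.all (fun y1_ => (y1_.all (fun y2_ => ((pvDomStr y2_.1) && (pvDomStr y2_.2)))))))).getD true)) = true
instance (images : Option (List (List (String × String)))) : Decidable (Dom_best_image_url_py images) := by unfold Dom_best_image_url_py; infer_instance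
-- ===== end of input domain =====

-- ===== PORT A =====
-- img.get("#text") with '' default; Python's truthiness check 'img.get("#text")' is 'textOf img ≠ ""'
-- (a missing key gives None and an empty value gives "", both falsy, both mapped to "").
def pvTextOf (img : List (String × String)) : String := (img.lookup "#text").getD ""

-- inner 'for img in images: if img.get("size") == size and img.get("#text"): return img.get("#text")'
def pvAFind (imgs : List (List (String × String))) (size : String) : Option String :=
  match imgs with
  | [] => none
  | img :: rest =>
      if img.lookup "size" = some size ∧ pvTextOf img ≠ "" then some (pvTextOf img)
      else pvAFind rest size

-- 'for size in ["extralarge","large","medium"]: …'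
def pvASizeLoop (imgs : List (List (String × String))) (sizes : List String) : Option String :=
  match sizes with
  | [] => none
  | s :: rest =>
      match pvAFind imgs s with
      | some t => some t
      | none => pvASizeLoop imgs rest

-- 'for img in reversed(images): if img.get("#text"): return img.get("#text")'
def pvAFallback (imgs : List (List (String × String))) : Option String :=
  match imgs with
  | [] => none
  | img :: rest => if pvTextOf img ≠ "" then some (pvTextOf img) else pvAFallback rest

def best_image_url_py (images : Option (List (List (String × String)))) : String :=
  match images with
  | none => ""
  | some imgs =>
      if imgs.isEmpty then ""
      else
        match pvASizeLoop imgs ["extralarge", "large", "medium"] with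
        | some t => t
        | none =>
            match pvAFallback imgs.reverse with
            | some t => t
            | none => ""

-- ===== PORT B =====
-- one forward pass: dict of first non-empty '#text' per size (key may be None), plus last non-empty text
def pvBStep (st : PySem.Dict (Option String) String × String) (img : List (String × String)) :
    PySem.Dict (Option String) String × String :=
  let text := (img.lookup "#text").getD ""
  if text ≠ "" then
    let size := img.lookup "size"
    let first := if st.1.contains size then st.1 else st.1.insert size text
    (first, text)
  else st

def best_image_url_py_alt (images : Option (List (List (String × String)))) : String :=
  match images with
  | none => ""
  | some imgs =>
      if imgs.isEmpty then ""
      else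
        let st := imgs.foldl pvBStep (PySem.Dict.empty, "")
        match st.1.get? (some "extralarge") with
        | some t => t
        | none =>
            match st.1.get? (some "large") with
            | some t => t
            | none =>
                match st.1.get? (some "medium") with
                | some t => t
                | none => st.2

-- ===== PRECONDITION & SPEC =====
def Spec_best_image_url_py (images : Option (List (List (String × String)))) (out : String) : Prop := out = best_image_url_py_alt images
instance (images : Option (List (List (String × String)))) (out : String) : Decidable (Spec_best_image_url_py images out) := by unfold Spec_best_image_url_py; infer_instance

-- ===== CLAIM (what is proved, stated in full; the proofs are below) =====
def Claim_equal_best_image_url_py : Prop := ∀ (images : Option (List (List (String × String)))), Dom_best_image_url_py images → Spec_best_image_url_py images (best_image_url_py images)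

-- ===== LEMMAS AND PROOFS =====

-- the dict component of the fold: a lookup at key (some s) is the first match of A's per-size scan,
-- unless the key was already present in the accumulator
theorem pvB_dict_get (imgs : List (List (String × String))) (d : PySem.Dict (Option String) String)
    (l : String) (s : String) :
    ((imgs.foldl pvBStep (d, l)).1).get? (some s) =
      (match d.get? (some s) with
       | some t => some t
       | none => pvAFind imgs s) := by
  induction imgs generalizing d l with
  | nil => cases h : d.get? (some s) <;> simp [List.foldl, pvAFind, h]
  | cons img rest ih =>
      simp only [List.foldl]
      by_cases ht : pvTextOf img = ""
      · have hstep : pvBStep (d, l) img = (d, l) := by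
          simp [pvBStep, pvTextOf] at ht ⊢; simp [ht]
        rw [hstep, ih]
        have : pvAFind (img :: rest) s = pvAFind rest s := by
          simp [pvAFind, ht]
        rw [this]
      · have ht' : ((img.lookup "#text").getD "") ≠ "" := by simpa [pvTextOf] using ht
        by_cases hc : d.contains (img.lookup "size")
        · have hstep : pvBStep (d, l) img = (d, pvTextOf img) := by
            simp [pvBStep, pvTextOf, ht', hc]
          rw [hstep, ih]
          by_cases hs : img.lookup "size" = some s
          · have hsome : (d.get? (some s)).isSome := by
              rw [hs] at hc
              cases hg : d.get? (some s)
              · rw [PySem.Dict.get?_eq_none_iff_contains] at hg; simp [hg] at hc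
              · rfl
            cases hg : d.get? (some s)
            · simp [hg] at hsome
            · rfl
          · have : pvAFind (img :: rest) s = pvAFind rest s := by
              simp [pvAFind, hs]
            rw [this]
        · have hstep : pvBStep (d, l) img = (d.insert (img.lookup "size") (pvTextOf img), pvTextOf img) := by
            simp [pvBStep, pvTextOf, ht', hc]
          rw [hstep, ih]
          by_cases hs : img.lookup "size" = some s
          · have hd : d.get? (some s) = none := by
              rw [PySem.Dict.get?_eq_none_iff_contains]
              rw [hs] at hc; simpa using hc
            rw [hs, PySem.Dict.get?_insert_self, hd]
            simp [pvAFind, hs, pvTextOf, ht']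
          · rw [PySem.Dict.get?_insert, if_neg (Ne.symm hs)]
            have : pvAFind (img :: rest) s = pvAFind rest s := by
              simp [pvAFind, hs]
            rw [this]

-- the fallback scan distributes over append
theorem pvAFallback_append (xs ys : List (List (String × String))) :
    pvAFallback (xs ++ ys) =
      (match pvAFallback xs with
       | some t => some t
       | none => pvAFallback ys) := by
  induction xs with
  | nil => simp [pvAFallback]
  | cons x rest ih =>
      simp only [List.cons_append, pvAFallback, ih]
      by_cases h : pvTextOf x = "" <;> simp [h]

-- the 'last' component of the fold is A's reversed-fallback value, defaulting to the seed
theorem pvB_last (imgs : List (List (String × String))) (d : PySem.Dict (Option String) String)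
    (l : String) :
    (imgs.foldl pvBStep (d, l)).2 = (pvAFallback imgs.reverse).getD l := by
  induction imgs generalizing d l with
  | nil => simp [List.foldl, pvAFallback]
  | cons img rest ih =>
      simp only [List.foldl, List.reverse_cons, pvAFallback_append]
      by_cases ht : pvTextOf img = ""
      · have hstep : pvBStep (d, l) img = (d, l) := by
          simp [pvBStep, pvTextOf] at ht ⊢; simp [ht]
        have hone : pvAFallback [img] = none := by simp [pvAFallback, ht]
        rw [hstep, ih, hone]
        cases h : pvAFallback rest.reverse <;> simp [h]
      · have ht' : ((img.lookup "#text").getD "") ≠ "" := by simpa [pvTextOf] using ht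
        have hsnd : (pvBStep (d, l) img).2 = pvTextOf img := by
          simp [pvBStep, pvTextOf, ht']
        have hone : pvAFallback [img] = some (pvTextOf img) := by simp [pvAFallback, ht]
        have : (List.foldl pvBStep (pvBStep (d, l) img) rest).2
            = (pvAFallback rest.reverse).getD (pvBStep (d, l) img).2 := by
          rcases pvBStep (d, l) img with ⟨d', l'⟩; exact ih d' l'
        rw [this, hsnd, hone]
        cases h : pvAFallback rest.reverse <;> simp [h]

-- ===== VERDICT (by name: the statement is the Claim_ definition above) =====
theorem best_image_url_py_spec : Claim_equal_best_image_url_py := by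
  intro images _
  unfold Spec_best_image_url_py best_image_url_py best_image_url_py_alt
  cases images with
  | none => rfl
  | some imgs =>
      by_cases he : imgs.isEmpty
      · simp [he]
      · simp only [he, if_false, Bool.false_eq_true, ite_false]
        have hget : ∀ s, ((imgs.foldl pvBStep (PySem.Dict.empty, "")).1).get? (some s) = pvAFind imgs s := by
          intro s
          rw [pvB_dict_get]
          simp [PySem.Dict.get?_empty]
        have hlast : (imgs.foldl pvBStep (PySem.Dict.empty, "")).2 = (pvAFallback imgs.reverse).getD "" := pvB_last imgs _ _
        rw [hget, hget, hget, hlast]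
        simp only [pvASizeLoop]
        cases pvAFind imgs "extralarge" <;> cases pvAFind imgs "large" <;> cases pvAFind imgs "medium" <;>
          cases h : pvAFallback imgs.reverse <;> simp [pvASizeLoop, h]
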